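-- pv_equiv track=rewrite | github.com/Ritesh27P/Problems | HackerRank/Easy Level/picking_number.py | pickingNumber
-- ===== SOURCE A (Python) =====
-- def pickingNumber(a):
--     unique_number = []
--     combination = 0
--     for i in a:
--         if i not in unique_number:
--             unique_number.append(i)
--     unique_number = sorted(unique_number)
--
--     temp1 = 0
--     for i in unique_number:
--         if i+1 in unique_number:
--             temp1 += (a.count(i) + a.count(i+1))
--             unique_number.remove(i+1)
--
--         if combination < temp1:
--             combination = temp1
--         temp1 = 0
--
--     return (combination)
-- ===== SOURCE B (Python) =====
-- def pickingNumber(a):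
--     # Counter built in one pass, then a single index walk over the sorted
--     # distinct values with greedy skip-pairing (same pairing A's remove() does).
--     cnt = {}
--     for x in a:
--         cnt[x] = cnt.get(x, 0) + 1
--     vals = sorted(cnt)
--     best = 0
--     j = 0
--     while j < len(vals):
--         if j + 1 < len(vals) and vals[j + 1] == vals[j] + 1:
--             best = max(best, cnt[vals[j]] + cnt[vals[j + 1]])
--             j += 2
--         else:
--             j += 1
--     return best
-- ===== Notes on version B (the rewrite author's own statement) =====
-- stated objective: faster
-- what changed: Replaces A's repeated list membership tests, a.count scans and in-loop remove() with a dict counter built in one pass and a single index walk over the sorted distinct values doing the same greedy skip-pairing.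
import Mathlib
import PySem

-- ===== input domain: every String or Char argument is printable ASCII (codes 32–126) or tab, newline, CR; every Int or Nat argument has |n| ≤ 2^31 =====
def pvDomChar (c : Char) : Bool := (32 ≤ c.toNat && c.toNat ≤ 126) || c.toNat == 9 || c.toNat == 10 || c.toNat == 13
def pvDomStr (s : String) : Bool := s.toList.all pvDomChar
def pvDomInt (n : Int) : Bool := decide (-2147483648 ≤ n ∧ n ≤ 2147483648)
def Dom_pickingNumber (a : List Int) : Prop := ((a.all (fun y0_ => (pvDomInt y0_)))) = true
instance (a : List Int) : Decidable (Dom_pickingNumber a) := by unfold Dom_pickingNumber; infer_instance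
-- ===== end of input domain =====

-- B replaces A's quadratic membership/count/remove list scans with a counter dict
-- and one greedy index walk over the sorted distinct values (same results).

-- ===== PORT A =====
-- Python's `for i in unique_number` with `unique_number.remove(i+1)` inside is an
-- index-based loop over the mutating list; ported as index recursion with fuel =
-- initial length (the list only shrinks, so fuel suffices; loop exits at none).
def pvALoop (a : List Int) : Nat → Nat → List Int → Int → Int
  | 0, _, _, comb => comb
  | fuel+1, idx, u, comb =>
    match u[idx]? with
    | none => comb
    | some i =>
      if (i + 1) ∈ u then
        -- temp1 += a.count(i) + a.count(i+1); unique_number.remove(i+1)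
        -- remove? is some here since i+1 ∈ u, so getD never takes the default
        let temp1 : Int := (PySem.List.count a i : Int) + (PySem.List.count a (i + 1) : Int)
        let u' := (PySem.List.remove? u (i + 1)).getD u
        pvALoop a fuel (idx + 1) u' (if comb < temp1 then temp1 else comb)
      else
        pvALoop a fuel (idx + 1) u (if comb < (0 : Int) then 0 else comb)

def pickingNumber (a : List Int) : Int :=
  let unique0 := a.foldl (fun u i => if u.contains i then u else u ++ [i]) []
  let unique := PySem.List.sorted unique0 (fun x => x) false
  pvALoop a unique.length 0 unique 0

-- ===== PORT B =====
-- Source B's while loop: j steps by 2 on a pair, by 1 otherwise; fuel = len(vals).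
def pvBLoop (vals : List Int) (cnt : PySem.Dict Int Int) : Nat → Nat → Int → Int
  | 0, _, best => best
  | fuel+1, j, best =>
    if j < vals.length then
      if j + 1 < vals.length ∧ vals.getD (j + 1) 0 = vals.getD j 0 + 1 then
        pvBLoop vals cnt fuel (j + 2)
          (max best (cnt.getD (vals.getD j 0) 0 + cnt.getD (vals.getD (j + 1) 0) 0))
      else
        pvBLoop vals cnt fuel (j + 1) best
    else best

def pickingNumber_alt (a : List Int) : Int :=
  let cnt := a.foldl (fun d x => d.insert x (d.getD x 0 + 1)) PySem.Dict.empty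
  let vals := PySem.List.sorted cnt.keys (fun x => x) false
  pvBLoop vals cnt vals.length 0 0

-- ===== PRECONDITION & SPEC =====
def Spec_pickingNumber (a : List Int) (out : Int) : Prop := out = pickingNumber_alt a
instance (a : List Int) (out : Int) : Decidable (Spec_pickingNumber a out) := by unfold Spec_pickingNumber; infer_instance

-- ===== CLAIM (what is proved, stated in full; the proofs are below) =====
def Claim_equal_pickingNumber : Prop := ∀ (a : List Int), Dom_pickingNumber a → Spec_pickingNumber a (pickingNumber a)

-- ===== LEMMAS AND PROOFS =====

-- Common abstraction: greedy skip-pairing over a strictly increasing value list.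
def pvGreedy (c : Int → Int) : List Int → Int → Int
  | [], best => best
  | [_], best => best
  | v :: w :: rest, best =>
    if w = v + 1 then pvGreedy c rest (max best (c v + c w))
    else pvGreedy c (w :: rest) best

theorem pvMemPair {i : Int} {pre rest : List Int}
    (hp : (pre ++ i :: rest).Pairwise (· < ·)) :
    ((i + 1) ∈ pre ++ i :: rest) ↔ (∃ rest', rest = (i + 1) :: rest') := by
  rcases List.pairwise_append.mp hp with ⟨hpre, hcons, hcross⟩
  constructor
  · intro hm
    rcases List.mem_append.mp hm with h | h
    · exact absurd (hcross _ h _ (List.mem_cons_self)) (by omega)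
    · rcases List.mem_cons.mp h with h | h
      · omega
      · rcases List.pairwise_cons.mp hcons with ⟨hlt, hrest⟩
        cases rest with
        | nil => simp at h
        | cons w rest' =>
          refine ⟨rest', ?_⟩
          rcases List.mem_cons.mp h with h | h
          · rw [h]
          · rcases List.pairwise_cons.mp hrest with ⟨hlt2, _⟩
            have hiw := hlt w List.mem_cons_self
            have := hlt2 _ h
            have := hlt _ (List.mem_cons_of_mem _ h)
            omega
  · rintro ⟨rest', rfl⟩
    exact List.mem_append.mpr (Or.inr (List.mem_cons_of_mem _ List.mem_cons_self))

theorem pvALoop_eq (a : List Int) :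
    ∀ (fuel : Nat) (suf pre : List Int) (comb : Int),
      (pre ++ suf).Pairwise (· < ·) → suf.length ≤ fuel → 0 ≤ comb →
      pvALoop a fuel pre.length (pre ++ suf) comb
        = pvGreedy (fun v => (PySem.List.count a v : Int)) suf comb := by
  intro fuel
  induction fuel with
  | zero =>
    intro suf pre comb hp hf hc
    have hnil : suf = [] := List.eq_nil_of_length_eq_zero (by omega)
    subst hnil
    simp [pvALoop, pvGreedy]
  | succ fuel ih =>
    intro suf pre comb hp hf hc
    cases suf with
    | nil =>
      have hnone : (pre ++ ([] : List Int))[pre.length]? = none := by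
        apply List.getElem?_eq_none
        simp
      rw [pvALoop, hnone, pvGreedy]
    | cons i rest =>
      have hget : (pre ++ i :: rest)[pre.length]? = some i := by
        rw [List.getElem?_append_right (Nat.le_refl _)]
        simp
      rw [pvALoop, hget]
      simp only
      by_cases hmem : (i + 1) ∈ pre ++ i :: rest
      · rcases (pvMemPair hp).mp hmem with ⟨rest', rfl⟩
        rw [if_pos hmem]
        have hne : (i + 1) ∉ pre ++ [i] := by
          intro h
          rcases List.pairwise_append.mp hp with ⟨_, _, hcross⟩
          rcases List.mem_append.mp h with h | h
          · have := hcross _ h i List.mem_cons_self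
            omega
          · simp at h
        have herase : (pre ++ i :: (i + 1) :: rest').erase (i + 1)
            = (pre ++ [i]) ++ rest' := by
          have : pre ++ i :: (i + 1) :: rest' = (pre ++ [i]) ++ (i + 1) :: rest' := by
            simp
          rw [this, List.erase_append_right _ hne, List.erase_cons_head]
        rw [PySem.List.remove?_eq_some_erase _ _ hmem, Option.getD_some, herase]
        have hlen : pre.length + 1 = (pre ++ [i]).length := by simp
        set comb' := (if comb < (PySem.List.count a i : Int) + (PySem.List.count a (i + 1) : Int)
            then (PySem.List.count a i : Int) + (PySem.List.count a (i + 1) : Int) else comb) with hcomb'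
        have hpw : ((pre ++ [i]) ++ rest').Pairwise (· < ·) := by
          refine List.Pairwise.sublist ?_ hp
          simp only [List.append_assoc, List.singleton_append]
          exact List.Sublist.append_left
            ((List.sublist_cons_self (i + 1) rest').cons₂ i) pre
        rw [hlen, ih rest' (pre ++ [i]) comb' hpw (by simp only [List.length_cons] at hf; omega) (by rw [hcomb']; split <;> omega)]
        rw [pvGreedy, if_pos rfl]
        congr 1
        rw [hcomb']
        rcases le_or_gt comb ((PySem.List.count a i : Int) + (PySem.List.count a (i + 1) : Int)) with h | h
        · rw [max_eq_right h]; split <;> omega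
        · rw [max_eq_left (le_of_lt h)]; split <;> omega
      · rw [if_neg hmem, if_neg (by omega)]
        have hlen : pre.length + 1 = (pre ++ [i]).length := by simp
        have hre : pre ++ i :: rest = (pre ++ [i]) ++ rest := by simp
        rw [hre, hlen, ih rest (pre ++ [i]) comb (by rw [← hre]; exact hp) (by simp only [List.length_cons] at hf; omega) hc]
        cases rest with
        | nil => simp [pvGreedy]
        | cons w rest' =>
          have hwne : w ≠ i + 1 := by
            intro h
            exact hmem ((pvMemPair hp).mpr ⟨rest', by rw [h]⟩)
          rw [pvGreedy, if_neg hwne]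

theorem pvBLoop_eq (vals : List Int) (cnt : PySem.Dict Int Int) :
    ∀ (fuel j : Nat) (best : Int), vals.length - j ≤ fuel →
      pvBLoop vals cnt fuel j best
        = pvGreedy (fun v => cnt.getD v 0) (vals.drop j) best := by
  intro fuel
  induction fuel with
  | zero =>
    intro j best hf
    have : vals.length ≤ j := by omega
    rw [pvBLoop, List.drop_eq_nil_of_le this, pvGreedy]
  | succ fuel ih =>
    intro j best hf
    rw [pvBLoop]
    by_cases hj : j < vals.length
    · rw [if_pos hj]
      have hdrop : vals.drop j = vals[j] :: vals.drop (j + 1) := List.drop_eq_getElem_cons hj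
      by_cases hj1 : j + 1 < vals.length
      · have hdrop1 : vals.drop (j + 1) = vals[j + 1] :: vals.drop (j + 2) :=
          List.drop_eq_getElem_cons hj1
        have hgj : vals.getD j 0 = vals[j] := List.getD_eq_getElem vals 0 hj
        have hgj1 : vals.getD (j + 1) 0 = vals[j + 1] := List.getD_eq_getElem vals 0 hj1
        by_cases hpair : vals[j + 1] = vals[j] + 1
        · rw [if_pos ⟨hj1, by rw [hgj, hgj1, hpair]⟩]
          rw [ih (j + 2) _ (by omega), hdrop, hdrop1, pvGreedy, if_pos hpair, hgj, hgj1]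
        · rw [if_neg (by rw [hgj, hgj1]; intro h; exact hpair h.2)]
          rw [ih (j + 1) best (by omega), hdrop, hdrop1, pvGreedy, if_neg hpair, ← hdrop1]
      · rw [if_neg (by intro h; exact absurd h.1 hj1)]
        rw [ih (j + 1) best (by omega), hdrop,
          List.drop_eq_nil_of_le (by omega : vals.length ≤ j + 1)]
        simp [pvGreedy]
    · rw [if_neg hj, List.drop_eq_nil_of_le (by omega), pvGreedy]

-- ===== VERDICT (by name: the statement is the Claim_ definition above) =====
theorem pickingNumber_spec : Claim_equal_pickingNumber := by
  intro a _
  unfold Spec_pickingNumber pickingNumber pickingNumber_alt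
  simp only
  have hfold : a.foldl (fun u i => if u.contains i then u else u ++ [i]) []
      = PySem.Set.ofList a := by
    rw [PySem.Set.ofList_eq_foldl]; rfl
  have hcnt : a.foldl (fun d x => d.insert x (d.getD x 0 + 1)) PySem.Dict.empty
      = PySem.Dict.counter a := PySem.Dict.foldl_insert_getD_add_one_eq_counter a
  rw [hfold, hcnt, PySem.Dict.keys_counter]
  set L := PySem.List.sorted (PySem.Set.ofList a) (fun x => x) false with hL
  have hpw : L.Pairwise (· < ·) := PySem.List.sorted_ofList_pairwise_lt a
  have hA := pvALoop_eq a L.length L [] 0 (by simpa using hpw) (Nat.le_refl _) (le_refl 0)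
  simp only [List.nil_append, List.length_nil] at hA
  rw [hA, pvBLoop_eq L (PySem.Dict.counter a) L.length 0 0 (by omega), List.drop_zero]
  congr 1
  funext v
  rw [PySem.Dict.getD_counter, PySem.List.count_eq]
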